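-- pv_equiv track=rewrite | github.com/RaresGIT/advent-solutions | 2022/5/problem2.py | edit_list
-- ===== SOURCE A (Python) =====
-- def edit_list(list: list):
--     empty_spaces = int(list.count('') /4)
--
--     for i in range(empty_spaces):
--         empty_space = list.index('')
--         list[empty_space] = '|'
--         for i in range(3):
--             list.remove('')
--
--     return list
-- ===== SOURCE B (Python) =====
-- # Single pass: the first count('')//4*4 empty strings are consumed in groups of
-- # four (first of each group -> '|', rest dropped); later empties are kept.
-- # Equivalence is about the return value only: A mutates its argument in place, B does not.
-- def edit_list(list: list):
--     limit = list.count('') // 4 * 4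
--     out = []
--     k = 0
--     for s in list:
--         if s != '':
--             out.append(s)
--         else:
--             k += 1
--             if k > limit:
--                 out.append('')
--             elif k % 4 == 1:
--                 out.append('|')
--     return out
-- ===== Notes on version B (the rewrite author's own statement) =====
-- stated objective: alternative
-- what changed: Replaced the repeated index/set/remove-scan loop (one full scan plus three removes per group of four empties) by one left-to-right pass with an empty-string counter that emits '|' for every group leader and drops the rest; B builds a fresh list instead of mutating the argument.
import Mathlib
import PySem

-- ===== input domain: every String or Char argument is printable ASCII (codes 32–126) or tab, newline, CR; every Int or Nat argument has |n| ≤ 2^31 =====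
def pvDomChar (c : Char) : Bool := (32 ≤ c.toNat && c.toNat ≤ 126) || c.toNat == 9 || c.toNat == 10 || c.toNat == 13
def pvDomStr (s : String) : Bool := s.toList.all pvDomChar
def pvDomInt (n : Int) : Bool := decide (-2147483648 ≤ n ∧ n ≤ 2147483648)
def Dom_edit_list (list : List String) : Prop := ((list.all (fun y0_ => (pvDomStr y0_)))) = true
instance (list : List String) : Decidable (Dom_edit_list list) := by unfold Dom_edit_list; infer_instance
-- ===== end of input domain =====

-- B is one left-to-right pass instead of A's repeated scan-and-remove; equivalence is about the
-- return value only (A mutates its argument in place, B builds a fresh list).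

-- ===== PORT A =====
-- loop body of A's outer for-loop: list.index(''), list[i]='|', then three list.remove('')
-- (the 'none' arms are where Python would raise ValueError; they are unreachable because
-- the outer loop runs count('')//4 times, so four empties are always available)
def stepA (l : List String) : List String :=
  match PySem.List.index? l "" with
  | none => l
  | some i =>
    let l := l.set i "|"
    (List.range 3).foldl (fun l _ =>
      match PySem.List.remove? l "" with
      | none => l
      | some l' => l') l

def edit_list (list : List String) : List String :=
  -- int(list.count('')/4): count ≥ 0 and exact in float on the domain, so = count // 4
  let empty_spaces := PySem.List.count list "" / 4
  (List.range empty_spaces).foldl (fun l _ => stepA l) list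

-- ===== PORT B =====
def edit_list_alt (list : List String) : List String :=
  let limit := PySem.List.count list "" / 4 * 4
  (list.foldl (fun (st : List String × Nat) s =>
    let out := st.1
    let k := st.2
    if s ≠ "" then (out ++ [s], k)
    else
      let k := k + 1
      if k > limit then (out ++ [""], k)
      else if k % 4 = 1 then (out ++ ["|"], k)
      else (out, k)) ([], 0)).1

-- ===== PRECONDITION & SPEC =====
def Spec_edit_list (list : List String) (out : List String) : Prop := out = edit_list_alt list
instance (list : List String) (out : List String) : Decidable (Spec_edit_list list out) := by unfold Spec_edit_list; infer_instance

-- ===== CLAIM (what is proved, stated in full; the proofs are below) =====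
def Claim_equal_edit_list : Prop := ∀ (list : List String), Dom_edit_list list → Spec_edit_list list (edit_list list)

-- ===== LEMMAS AND PROOFS =====

-- mathematical middle-man: process the list once, with c = number of empties still to consume
def mark (c : Nat) : List String → List String
  | [] => []
  | s :: r =>
    if s = "" then
      if c = 0 then "" :: mark 0 r
      else if c % 4 = 0 then "|" :: mark (c - 1) r
      else mark (c - 1) r
    else s :: mark c r

-- iterate stepA n times (first application innermost, as foldl does)
def iterA : Nat → List String → List String
  | 0, l => l
  | n + 1, l => iterA n (stepA l)

theorem foldl_stepA_eq_iterA (ys : List Nat) (l : List String) :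
    ys.foldl (fun acc _ => stepA acc) l = iterA ys.length l := by
  induction ys generalizing l with
  | nil => rfl
  | cons y ys ih => simpa [List.foldl, iterA] using ih (stepA l)

theorem mark_append_no_empty (c : Nat) (p xs : List String) (hp : "" ∉ p) :
    mark c (p ++ xs) = p ++ mark c xs := by
  induction p with
  | nil => rfl
  | cons a p ih =>
    have ha : a ≠ "" := by intro h; exact hp (h ▸ List.mem_cons_self)
    have hp' : "" ∉ p := fun h => hp (List.mem_cons_of_mem _ h)
    simp [mark, ha, ih hp']

theorem mark_erase (c : Nat) (hc : 0 < c) (hc4 : c % 4 ≠ 0) (q : List String)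
    (hq : "" ∈ q) : mark c q = mark (c - 1) (q.erase "") := by
  induction q with
  | nil => cases hq
  | cons a q ih =>
    by_cases ha : a = ""
    · subst ha
      simp [mark, hc.ne', hc4, List.erase_cons_head]
    · have hq' : "" ∈ q := by
        rcases List.mem_cons.mp hq with h | h
        · exact absurd h.symm ha
        · exact h
      have : (a :: q).erase "" = a :: q.erase "" := by
        simp [ha]
      simp [mark, ha, this, ih hq']

theorem count_pos_decomp (xs : List String) (h : "" ∈ xs) :
    ∃ p q, xs = p ++ "" :: q ∧ "" ∉ p := by
  rcases (PySem.List.index?_isSome_iff xs "").mpr h with h'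
  rcases Option.isSome_iff_exists.mp h' with ⟨k, hk⟩
  rcases (PySem.List.index?_eq_some_iff xs "" k).mp hk with ⟨p, q, hd, _, hnp⟩
  exact ⟨p, q, hd, hnp⟩

theorem set_append_len (p q : List String) (v w : String) :
    (p ++ v :: q).set p.length w = p ++ w :: q := by
  induction p with
  | nil => rfl
  | cons a p ih => simp [ih]

theorem stepA_decomp (p q : List String) (hp : "" ∉ p) (hq : 3 ≤ q.count "") :
    stepA (p ++ "" :: q) = p ++ "|" :: ((q.erase "").erase "").erase "" := by
  have hidx : PySem.List.index? (p ++ "" :: q) "" = some p.length := by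
    rw [PySem.List.index?_eq_some_iff]
    exact ⟨p, q, rfl, rfl, hp⟩
  have hnp : "" ∉ p := hp
  have hq1 : "" ∈ q := List.count_pos_iff.mp (by omega)
  have hq2 : "" ∈ q.erase "" := by
    have := List.count_erase_self (a := "") (l := q)
    exact List.count_pos_iff.mp (by omega)
  have hq3 : "" ∈ (q.erase "").erase "" := by
    have h1 := List.count_erase_self (a := "") (l := q)
    have h2 := List.count_erase_self (a := "") (l := q.erase "")
    exact List.count_pos_iff.mp (by omega)
  have hbar : ("|" : String) ≠ "" := by decide
  have er : ∀ l : List String, "" ∈ l →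
      (p ++ "|" :: l).erase "" = p ++ "|" :: l.erase "" := by
    intro l hl
    rw [List.erase_append_right _ hnp, List.erase_cons]
    simp
  have rm : ∀ l : List String, "" ∈ l →
      PySem.List.remove? (p ++ "|" :: l) "" = some (p ++ "|" :: l.erase "") := by
    intro l hl
    have hmem : "" ∈ p ++ "|" :: l := by
      simp [hl]
    rw [PySem.List.remove?_eq_some_erase _ _ hmem, er l hl]
  show (match PySem.List.index? (p ++ "" :: q) "" with
    | none => p ++ "" :: q
    | some i =>
      (List.range 3).foldl (fun l _ =>
        match PySem.List.remove? l "" with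
        | none => l
        | some l' => l') ((p ++ "" :: q).set i "|")) = _
  rw [hidx]
  show (List.range 3).foldl _ ((p ++ "" :: q).set p.length "|") = _
  rw [set_append_len]
  show (List.range 3).foldl (fun l _ =>
      match PySem.List.remove? l "" with
      | none => l
      | some l' => l') (p ++ "|" :: q) = _
  have hr3 : List.range 3 = [0, 1, 2] := by decide
  rw [hr3]
  simp only [List.foldl]
  rw [rm q hq1, rm _ hq2, rm _ hq3]

theorem iterA_eq_mark (n : Nat) (xs : List String) (h : 4 * n ≤ xs.count "") :
    iterA n xs = mark (4 * n) xs := by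
  induction n generalizing xs with
  | zero =>
    show xs = mark 0 xs
    induction xs with
    | nil => rfl
    | cons a l ih => by_cases ha : a = "" <;> simp [mark, ha, ← ih]
  | succ n ih =>
    have hmem : "" ∈ xs := List.count_pos_iff.mp (by omega)
    rcases count_pos_decomp xs hmem with ⟨p, q, hd, hp⟩
    subst hd
    have hcp : p.count "" = 0 := List.count_eq_zero.mpr hp
    have hcq : (p ++ "" :: q).count "" = q.count "" + 1 := by
      simp [List.count_append, hcp]
    have hq3 : 3 ≤ q.count "" := by omega
    have e1 := List.count_erase_self (a := "") (l := q)
    have e2 := List.count_erase_self (a := "") (l := q.erase "")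
    have e3 := List.count_erase_self (a := "") (l := (q.erase "").erase "")
    have m1 : "" ∈ q := List.count_pos_iff.mp (by omega)
    have m2 : "" ∈ q.erase "" := List.count_pos_iff.mp (by omega)
    have m3 : "" ∈ (q.erase "").erase "" := List.count_pos_iff.mp (by omega)
    have hcnt3 : 4 * n ≤ (((q.erase "").erase "").erase "").count "" := by omega
    have hbar : ("|" : String) ≠ "" := by decide
    have hstep : iterA (n + 1) (p ++ "" :: q) =
        iterA n (p ++ "|" :: ((q.erase "").erase "").erase "") := by
      show iterA n (stepA (p ++ "" :: q)) = _
      rw [stepA_decomp p q hp hq3]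
    have hcntB : 4 * n ≤ (p ++ "|" :: ((q.erase "").erase "").erase "").count "" := by
      simp [List.count_append, hcp, hbar]
      omega
    rw [hstep, ih _ hcntB]
    have hnp' : "" ∉ p ++ ["|"] := by
      intro h
      rcases List.mem_append.mp h with h | h
      · exact hp h
      · simp at h
    have lhs : mark (4 * (n + 1)) (p ++ "" :: q) =
        p ++ "|" :: mark (4 * n + 3) q := by
      rw [mark_append_no_empty _ p _ hp]
      have h0 : 4 * (n + 1) ≠ 0 := by omega
      have h4 : 4 * (n + 1) % 4 = 0 := by omega
      have h1 : 4 * (n + 1) - 1 = 4 * n + 3 := by omega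
      simp [mark, h0, h4, h1]
    rw [lhs]
    have s1 : mark (4 * n + 3) q = mark (4 * n + 2) (q.erase "") := by
      have := mark_erase (4 * n + 3) (by omega) (by omega) q m1
      have he : 4 * n + 3 - 1 = 4 * n + 2 := by omega
      rwa [he] at this
    have s2 : mark (4 * n + 2) (q.erase "") = mark (4 * n + 1) ((q.erase "").erase "") := by
      have := mark_erase (4 * n + 2) (by omega) (by omega) _ m2
      have he : 4 * n + 2 - 1 = 4 * n + 1 := by omega
      rwa [he] at this
    have s3 : mark (4 * n + 1) ((q.erase "").erase "") =
        mark (4 * n) (((q.erase "").erase "").erase "") := by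
      have := mark_erase (4 * n + 1) (by omega) (by omega) _ m3
      have he : 4 * n + 1 - 1 = 4 * n := by omega
      rwa [he] at this
    have rhs : mark (4 * n) (p ++ "|" :: ((q.erase "").erase "").erase "") =
        p ++ "|" :: mark (4 * n) (((q.erase "").erase "").erase "") := by
      have := mark_append_no_empty (4 * n) (p ++ ["|"]) (((q.erase "").erase "").erase "") hnp'
      simpa using this
    rw [rhs, s1, s2, s3]

-- the recursion underlying B's foldl
def goB (limit : Nat) (k : Nat) : List String → List String
  | [] => []
  | s :: r =>
    if s ≠ "" then s :: goB limit k r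
    else
      if k + 1 > limit then "" :: goB limit (k + 1) r
      else if (k + 1) % 4 = 1 then "|" :: goB limit (k + 1) r
      else goB limit (k + 1) r

theorem foldB_eq_goB (limit : Nat) (xs : List String) (out : List String) (k : Nat) :
    (xs.foldl (fun (st : List String × Nat) s =>
      let o := st.1
      let k := st.2
      if s ≠ "" then (o ++ [s], k)
      else
        let k := k + 1
        if k > limit then (o ++ [""], k)
        else if k % 4 = 1 then (o ++ ["|"], k)
        else (o, k)) (out, k)) = (out ++ goB limit k xs, k + xs.count "") := by
  induction xs generalizing out k with
  | nil => simp [goB]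
  | cons s r ih =>
    simp only [List.foldl_cons]
    by_cases hs : s = ""
    · subst hs
      simp only [ne_eq, not_true_eq_false, if_false]
      by_cases h1 : k + 1 > limit
      · rw [if_pos h1, ih]
        simp [goB, h1]
        omega
      · rw [if_neg h1]
        by_cases h2 : (k + 1) % 4 = 1
        · rw [if_pos h2, ih]
          simp [goB, h1, h2]
          omega
        · rw [if_neg h2, ih]
          simp [goB, h1, h2]
          omega
    · dsimp only
      rw [if_pos (by exact hs : s ≠ "")]
      rw [ih]
      simp [goB, hs]

theorem goB_eq_mark (limit : Nat) (h4 : limit % 4 = 0) (xs : List String) :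
    ∀ k, goB limit k xs = mark (limit - k) xs := by
  induction xs with
  | nil => intro k; rfl
  | cons s r ih =>
    intro k
    by_cases hs : s = ""
    · subst hs
      by_cases h1 : k + 1 > limit
      · have hc : limit - k = 0 := by omega
        have : limit - (k + 1) = 0 := by omega
        simp [goB, mark, h1, hc, ih, this]
      · have hc0 : limit - k ≠ 0 := by omega
        have hsub : limit - k - 1 = limit - (k + 1) := by omega
        by_cases h2 : (k + 1) % 4 = 1
        · have : (limit - k) % 4 = 0 := by omega
          simp [goB, mark, h1, h2, hc0, this, ih, hsub]
        · have : (limit - k) % 4 ≠ 0 := by omega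
          simp [goB, mark, h1, h2, hc0, this, ih, hsub]
    · simp [goB, mark, hs, ih]

-- ===== VERDICT (by name: the statement is the Claim_ definition above) =====
theorem edit_list_spec : Claim_equal_edit_list := by
  intro list _
  show edit_list list = edit_list_alt list
  unfold edit_list edit_list_alt
  rw [PySem.List.count_eq]
  have hA : (List.range (list.count "" / 4)).foldl (fun l _ => stepA l) list =
      iterA (list.count "" / 4) list := by
    simpa using foldl_stepA_eq_iterA (List.range (list.count "" / 4)) list
  rw [hA, iterA_eq_mark _ _ (by omega)]
  dsimp only
  rw [foldB_eq_goB]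
  simp only [List.nil_append]
  rw [goB_eq_mark _ (by omega) _ 0]
  congr 1
  omega
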